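-- pv_equiv track=rewrite | github.com/waylandy/HelperBunny | seqarray/reader.py | _excise
-- ===== SOURCE A (Python) =====
-- def _excise(s, border=')('):
--     b1, b2 = border
--     b1s, b2s = True, True
--     l, p = ['','',''], 0
--     for e in s:
--         if e==b1 and b1s:
--             b1s = False
--             p+=1
--             continue
--         elif e==b2 and b2s and not b1s:
--             b2s = False
--             p+=1
--             continue
--         l[p]+=e
--     l = [''.join([y for y in x if y not in '{\n})(*']) for x in l]
--     l[0], l[2] = l[0].lower(), l[2].lower()
--     return l
-- ===== SOURCE B (Python) =====
-- def _excise(s, border=')('):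
--     b1, b2 = border
--     head, _, rest = s.partition(b1)
--     mid, _, tail = rest.partition(b2)
--     drop = set('{\n})(*')
--     clean = lambda t: ''.join(c for c in t if c not in drop)
--     return [clean(head).lower(), clean(mid), clean(tail).lower()]
-- ===== Notes on version B (the rewrite author's own statement) =====
-- stated objective: simpler
-- what changed: Replaces the per-character state machine (flags b1s/b2s and bucket index p) with two str.partition calls that split at the first border chars, then filters and lowercases each segment.
import Mathlib
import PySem

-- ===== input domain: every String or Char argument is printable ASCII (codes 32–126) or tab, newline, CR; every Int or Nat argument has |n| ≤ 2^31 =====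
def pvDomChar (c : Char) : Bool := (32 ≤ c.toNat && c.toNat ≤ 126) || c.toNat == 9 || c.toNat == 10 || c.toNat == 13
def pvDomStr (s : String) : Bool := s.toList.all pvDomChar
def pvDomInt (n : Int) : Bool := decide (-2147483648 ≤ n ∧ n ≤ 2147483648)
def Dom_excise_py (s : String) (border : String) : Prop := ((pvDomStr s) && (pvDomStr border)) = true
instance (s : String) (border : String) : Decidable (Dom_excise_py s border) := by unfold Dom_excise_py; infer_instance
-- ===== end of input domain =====

-- B replaces A's per-character state machine (flags b1s/b2s, bucket index p) by two
-- partition-at-first-occurrence splits, then the same per-segment filter and lowercasing (objective: simpler).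

-- ===== PORT A =====
-- filter removing chars of '{\n})(*' (the list comprehension + ''.join in A)
def pvClean (t : List Char) : List Char :=
  t.filter (fun y => !("{\n})(*".toList.contains y))

-- one step of A's for-loop body (state: b1s, b2s, p, the 3-bucket list l)
def pvStep (b1 b2 : Char) (st : Bool × Bool × Nat × List (List Char)) (e : Char) :
    Bool × Bool × Nat × List (List Char) :=
  let (b1s, b2s, p, l) := st
  if e == b1 && b1s then (false, b2s, p + 1, l)
  else if e == b2 && b2s && !b1s then (b1s, false, p + 1, l)
  else (b1s, b2s, p, l.set p (l.getD p [] ++ [e]))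

def excise_py (s : String) (border : String) : List String :=
  match border.toList with
  | [b1, b2] =>
    let st := s.toList.foldl (pvStep b1 b2) (true, true, 0, [[], [], []])
    match (st.2.2.2).map pvClean with
    | [l0, l1, l2] => [String.ofList (PySem.Chars.lower l0), String.ofList l1, String.ofList (PySem.Chars.lower l2)]
    | _ => []
  | _ => []  -- Python raises ValueError (unpacking) unless border has exactly 2 chars; excluded by Pre_

-- ===== PORT B =====
-- hand port of str.partition(c) for a 1-char separator: (part before first c, part after);
-- exact: when c is absent it returns (cs, []), matching partition's ('s', '', '')
def pvPartition (cs : List Char) (c : Char) : List Char × List Char :=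
  match cs with
  | [] => ([], [])
  | a :: rest =>
    if a == c then ([], rest)
    else
      let (x, y) := pvPartition rest c
      (a :: x, y)

-- the same drop-filter, written independently for B (''.join over c not in drop)
def pvCleanB (t : List Char) : List Char :=
  t.filter (fun y => !("{\n})(*".toList.contains y))

def excise_py_alt (s : String) (border : String) : List String :=
  -- 'b1, b2 = border': length-2 check + positional access (Python raises ValueError otherwise; excluded by Pre_)
  if hb : border.toList.length = 2 then
    let b1 := border.toList[0]
    let b2 := border.toList[1]
    let (head, rest) := pvPartition s.toList b1
    let (mid, tail) := pvPartition rest b2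
    [String.ofList (PySem.Chars.lower (pvCleanB head)), String.ofList (pvCleanB mid),
     String.ofList (PySem.Chars.lower (pvCleanB tail))]
  else []

-- ===== PRECONDITION & SPEC =====
-- Pre_ excludes exactly the borders that are not 2 characters long, on which A raises ValueError.
def Pre_excise_py (s : String) (border : String) : Prop := border.toList.length = 2
instance (s : String) (border : String) : Decidable (Pre_excise_py s border) := by
  unfold Pre_excise_py; infer_instance

def pvWitness_excise_py : String × String := ("AB(cd)EF", ")(")

def Spec_excise_py (s : String) (border : String) (out : List String) : Prop := out = excise_py_alt s border
instance (s : String) (border : String) (out : List String) : Decidable (Spec_excise_py s border out) := by unfold Spec_excise_py; infer_instance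

-- ===== CLAIM (what is proved, stated in full; the proofs are below) =====
def Claim_equal_excise_py : Prop := ∀ (s : String) (border : String), Dom_excise_py s border → Pre_excise_py s border → Spec_excise_py s border (excise_py s border)

-- ===== LEMMAS AND PROOFS =====

-- Phase 0 of A's loop (b1s = b2s = true, p = 0): everything goes into bucket 0 until the
-- first b1, which flips to phase 1 over the rest; pvPartition describes exactly that split.
lemma pvPhase0 (b1 b2 : Char) (cs l0 : List Char) :
    cs.foldl (pvStep b1 b2) (true, true, 0, [l0, [], []]) =
      if cs.contains b1 then
        ((pvPartition cs b1).2).foldl (pvStep b1 b2)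
          (false, true, 1, [l0 ++ (pvPartition cs b1).1, [], []])
      else (true, true, 0, [l0 ++ cs, [], []]) := by
  induction cs generalizing l0 with
  | nil => simp
  | cons c cs ih =>
    by_cases hc : c = b1
    · subst hc
      simp [pvStep, pvPartition]
    · have := ih (l0 ++ [c])
      simp [pvStep, pvPartition, hc, this, show ¬ b1 = c from fun h => hc h.symm]

-- Phase 1 (b1s = false, b2s = true, p = 1): bucket 1 until the first b2, then phase 2.
lemma pvPhase1 (b1 b2 : Char) (cs a l1 : List Char) :
    cs.foldl (pvStep b1 b2) (false, true, 1, [a, l1, []]) =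
      if cs.contains b2 then
        ((pvPartition cs b2).2).foldl (pvStep b1 b2)
          (false, false, 2, [a, l1 ++ (pvPartition cs b2).1, []])
      else (false, true, 1, [a, l1 ++ cs, []]) := by
  induction cs generalizing l1 with
  | nil => simp
  | cons c cs ih =>
    by_cases hc : c = b2
    · subst hc
      simp [pvStep, pvPartition]
    · have := ih (l1 ++ [c])
      simp [pvStep, pvPartition, hc, this, show ¬ b2 = c from fun h => hc h.symm]

-- Phase 2 (both flags false, p = 2): the rest of the string is appended to bucket 2.
lemma pvPhase2 (b1 b2 : Char) (cs a b l2 : List Char) :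
    cs.foldl (pvStep b1 b2) (false, false, 2, [a, b, l2]) =
      (false, false, 2, [a, b, l2 ++ cs]) := by
  induction cs generalizing l2 with
  | nil => simp
  | cons c cs ih =>
    have := ih (l2 ++ [c])
    simp [pvStep, this]

-- When the separator is absent, pvPartition returns the whole list and an empty tail.
lemma pvPartition_not_contains (cs : List Char) (c : Char) (h : cs.contains c = false) :
    pvPartition cs c = (cs, []) := by
  induction cs with
  | nil => simp [pvPartition]
  | cons a rest ih =>
    simp only [List.contains_cons, Bool.or_eq_false_iff] at h
    have ha : ¬ a = c := by
      intro hac; subst hac; simp at h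
    simp [pvPartition, ha, ih h.2]

-- ===== VERDICT (by name: the statement is the Claim_ definition above) =====
theorem excise_py_spec : Claim_equal_excise_py := by
  intro s border _ hpre
  unfold Spec_excise_py
  obtain ⟨b1, b2, hb⟩ : ∃ b1 b2, border.toList = [b1, b2] := by
    unfold Pre_excise_py at hpre
    match h : border.toList with
    | [x, y] => exact ⟨x, y, rfl⟩
    | [] => simp [h] at hpre
    | [x] => simp [h] at hpre
    | x :: y :: z :: t => simp [h] at hpre
  have hAlt : excise_py_alt s border =
      [String.ofList (PySem.Chars.lower (pvCleanB (pvPartition s.toList b1).1)),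
       String.ofList (pvCleanB (pvPartition (pvPartition s.toList b1).2 b2).1),
       String.ofList (PySem.Chars.lower (pvCleanB (pvPartition (pvPartition s.toList b1).2 b2).2))] := by
    simp [excise_py_alt, hb]
  rw [hAlt]
  unfold excise_py
  rw [hb]
  simp only
  rw [pvPhase0]
  by_cases h1 : s.toList.contains b1
  · simp only [h1, if_true]
    rw [pvPhase1]
    by_cases h2 : ((pvPartition s.toList b1).2).contains b2
    · simp only [h2, if_true]
      rw [pvPhase2]
      simp [pvClean, pvCleanB]
    · simp only [h2]
      rw [pvPartition_not_contains ((pvPartition s.toList b1).2) b2 (by simpa using h2)]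
      simp [pvClean, pvCleanB]
  · simp only [h1]
    rw [pvPartition_not_contains _ _ (by simpa using h1)]
    simp [pvClean, pvCleanB, pvPartition]
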